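-- pv_equiv track=rewrite | github.com/kjwan4435/BOJ | NAVER_HACKDAY/naverpay.py | solution
-- ===== SOURCE A (Python) =====
-- id_list = ["A B C D", "A D", "A B D", "B D"]
--
-- k = 2
--
-- def solution(id_list, k):
--     id_only = []
--     for i in range(len(id_list)):
--         id_list[i] = id_list[i].split() # 그날 고객 split
--         for j in range(len(id_list[i])):
--             if id_list[i][j] not in id_only:
--                 id_only.append(id_list[i][j]) # 고객 명단 추출
--
--     id_counter = [0 for _ in range(len(id_only))]
--     id_dict = dict(zip(id_only, id_counter)) # 고객에게 지급한 쿠폰 수 딕셔너리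
--     id_dayDict = dict(zip(id_only, id_counter)) # 고객에게 하루 지급한 쿠폰 수 딕셔너리
--
--     for i in range(len(id_list)):
--         for j in range(len(id_list[i])):
--             if id_dayDict[id_list[i][j]] == 0:
--                 id_dayDict[id_list[i][j]] += 1 # 고객에게 하루동안 최대 1회 쿠폰 지급
--         for j in range(len(id_only)):
--             if id_dict[id_only[j]] < k: # 고객이 이때까지 받은 쿠폰 수가 k이하라면,
--                 id_dict[id_only[j]] += id_dayDict[id_only[j]] # 고객에게 그날 지급해야할 쿠폰을 지급한다.
--             id_dayDict[id_only[j]] = 0 # 하루 지급해야하는 쿠폰 수 초기화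
--
--     answer= sum(id_dict.values())
--     return answer
-- ===== SOURCE B (Python) =====
-- def solution(id_list, k):
--     # Count-first-then-clamp: one pass tallying, per customer, on how many days
--     # they appear; answer = sum(min(days, cap)) with cap = max(k, 0).
--     # (Like A, this replaces each id_list[i] with its split word list in place.)
--     freq = {}
--     for i in range(len(id_list)):
--         id_list[i] = id_list[i].split()
--         for c in set(id_list[i]):
--             freq[c] = freq.get(c, 0) + 1
--     cap = k if k > 0 else 0
--     return sum(min(d, cap) for d in freq.values())
-- ===== Notes on version B (the rewrite author's own statement) =====
-- stated objective: faster
-- what changed: Replaces A's day-by-day coupon simulation (list-scan dedup of all customers, then per-day inner loop over every customer with a running cap check) by a single pass that counts, per customer, the number of distinct days they appear, then sums min(count, max(k,0)).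
import Mathlib
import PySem

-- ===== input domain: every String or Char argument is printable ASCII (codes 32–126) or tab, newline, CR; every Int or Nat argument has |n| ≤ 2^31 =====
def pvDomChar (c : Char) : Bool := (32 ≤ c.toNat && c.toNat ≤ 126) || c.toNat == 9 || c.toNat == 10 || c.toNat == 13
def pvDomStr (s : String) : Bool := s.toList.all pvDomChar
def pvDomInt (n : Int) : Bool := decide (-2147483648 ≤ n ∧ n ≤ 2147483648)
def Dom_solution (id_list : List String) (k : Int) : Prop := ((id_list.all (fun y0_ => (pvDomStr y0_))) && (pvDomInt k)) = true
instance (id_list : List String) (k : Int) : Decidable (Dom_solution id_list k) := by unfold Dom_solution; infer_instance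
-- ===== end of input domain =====

-- B replaces A's day-by-day coupon simulation by one counting pass per customer
-- plus a final clamp min(count, max(k,0)); equivalence of the RETURN value is proved
-- (both Pythons also mutate id_list in place identically; that side effect is not modelled).


-- ===== PORT A =====
-- first loop: id_list[i] = id_list[i].split() (the mutated list is st.1) and the
-- dedup-append building id_only (st.2); then the two zero dicts; then the day loop.
def solution (id_list : List String) (k : Int) : Int :=
  let st0 : List (List String) × List String :=
    id_list.foldl (fun st s =>
      (st.1 ++ [PySem.Str.split₀ s],
       (PySem.Str.split₀ s).foldl (fun acc t => if t ∈ acc then acc else acc ++ [t]) st.2))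
      (([] : List (List String)), ([] : List String))
  let days := st0.1
  let id_only := st0.2
  let id_counter : List Int := (PySem.List.pyRange 0 (id_only.length : Int)).map (fun _ => 0)
  let id_dict : PySem.Dict String Int := PySem.Dict.ofList (id_only.zip id_counter)
  let id_dayDict : PySem.Dict String Int := PySem.Dict.ofList (id_only.zip id_counter)
  let final := days.foldl (fun (st : PySem.Dict String Int × PySem.Dict String Int) day =>
      -- Python reads id_dayDict[t] with []; every t is a key (t ∈ id_only), so getD is exact here
      let dd := day.foldl (fun dd t =>
          if dd.getD t 0 == 0 then dd.insert t (dd.getD t 0 + 1) else dd) st.2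
      id_only.foldl (fun st2 c =>
          (if st2.1.getD c 0 < k then st2.1.insert c (st2.1.getD c 0 + st2.2.getD c 0) else st2.1,
           st2.2.insert c 0)) (st.1, dd)) (id_dict, id_dayDict)
  final.1.values.sum

-- ===== PORT B =====
def solution_alt (id_list : List String) (k : Int) : Int :=
  let freq : PySem.Dict String Int :=
    id_list.foldl (fun d s =>
      (PySem.Set.ofList (PySem.Str.split₀ s)).foldl (fun d c => d.insert c (d.getD c 0 + 1)) d)
      PySem.Dict.empty
  let cap := if k > 0 then k else 0
  (freq.values.map (fun v => min v cap)).sum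

-- ===== PRECONDITION & SPEC =====
def Spec_solution (id_list : List String) (k : Int) (out : Int) : Prop := out = solution_alt id_list k
instance (id_list : List String) (k : Int) (out : Int) : Decidable (Spec_solution id_list k out) := by unfold Spec_solution; infer_instance

-- ===== CLAIM (what is proved, stated in full; the proofs are below) =====
def Claim_equal_solution : Prop := ∀ (id_list : List String) (k : Int), Dom_solution id_list k → Spec_solution id_list k (solution id_list k)

-- ===== LEMMAS AND PROOFS =====

-- the clamp and the per-customer day count
def pvCap (k : Int) : Int := if 0 < k then k else 0
def pvCnt (ds : List (List String)) (c : String) : Int := (ds.countP (fun day => decide (c ∈ day)) : Nat)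
-- the customer roster in first-appearance order
def pvIds (ds : List (List String)) : List String := ds.foldl (fun acc day => PySem.Set.update acc day) []

theorem pvCap_nonneg (k : Int) : 0 ≤ pvCap k := by unfold pvCap; split <;> omega

theorem pvIds_go_mem (ds : List (List String)) (s : PySem.Set String) (c : String) :
    c ∈ ds.foldl (fun acc day => PySem.Set.update acc day) s ↔ c ∈ s ∨ ∃ d ∈ ds, c ∈ d := by
  induction ds generalizing s with
  | nil => simp
  | cons d t ih => simp [List.foldl_cons, ih, PySem.Set.mem_update]; tauto

theorem pvIds_mem (ds : List (List String)) (c : String) :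
    c ∈ pvIds ds ↔ ∃ d ∈ ds, c ∈ d := by
  unfold pvIds; rw [pvIds_go_mem]; simp

theorem pvIds_go_nodup (ds : List (List String)) (s : PySem.Set String) (h : s.Nodup) :
    (ds.foldl (fun acc day => PySem.Set.update acc day) s).Nodup := by
  induction ds generalizing s with
  | nil => exact h
  | cons d t ih => exact ih _ (PySem.Set.nodup_update _ _ h)

theorem pvIds_nodup (ds : List (List String)) : (pvIds ds).Nodup :=
  pvIds_go_nodup ds [] List.nodup_nil

-- a dict built from zero-valued pairs reads 0 everywhere
theorem pvZeroDict (ps : List (String × Int)) (d : PySem.Dict String Int)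
    (hd : ∀ c, d.getD c 0 = 0) (hz : ∀ p ∈ ps, p.2 = 0) :
    ∀ c, (ps.foldl (fun acc p => acc.insert p.1 p.2) d).getD c 0 = 0 := by
  induction ps generalizing d with
  | nil => exact hd
  | cons p t ih =>
      intro c
      refine ih _ (fun c' => ?_) (fun q hq => hz q (List.mem_cons_of_mem _ hq)) c
      rw [PySem.Dict.getD_insert]
      split
      · exact hz p (List.mem_cons_self) 
      · exact hd c'

-- first inner loop of a day: marks exactly the day's customers with 1 (from a 0/1 state)
theorem pvDayMark (day : List String) (d : PySem.Dict String Int) (S : String → Prop)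
    [DecidablePred S] (h : ∀ c, d.getD c 0 = if S c then 1 else 0) :
    ∀ c, (day.foldl (fun dd t =>
        if dd.getD t 0 == 0 then dd.insert t (dd.getD t 0 + 1) else dd) d).getD c 0
      = if S c ∨ c ∈ day then 1 else 0 := by
  induction day generalizing d S with
  | nil => intro c; simp [h c]
  | cons t rest ih =>
      intro c
      rw [List.foldl_cons]
      have := ih (d := if d.getD t 0 == 0 then d.insert t (d.getD t 0 + 1) else d)
        (S := fun c => S c ∨ c = t) ?_ c
      · rw [this]
        by_cases hc : S c <;> by_cases hct : c = t <;> simp [hc, hct]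
      · intro c'
        by_cases hst : S t
        · have : d.getD t 0 = 1 := by rw [h t]; simp [hst]
          simp only [this]
          norm_num
          rw [h c']
          by_cases hc' : S c' <;> by_cases he : c' = t <;> simp [hc', he] <;> try (subst he; tauto)
        · have : d.getD t 0 = 0 := by rw [h t]; simp [hst]
          simp only [this]
          norm_num
          rw [PySem.Dict.getD_insert]
          by_cases hc' : S c' <;> by_cases he : c' = t <;> simp [hc', he, h c']

-- one day of A's main loop / one day of B's pass (proof-side names for the ports' loop bodies)
def pvBodyA (k : Int) (ks : List String) (st : PySem.Dict String Int × PySem.Dict String Int)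
    (day : List String) : PySem.Dict String Int × PySem.Dict String Int :=
  let dd := day.foldl (fun dd t =>
      if dd.getD t 0 == 0 then dd.insert t (dd.getD t 0 + 1) else dd) st.2
  ks.foldl (fun st2 c =>
      (if st2.1.getD c 0 < k then st2.1.insert c (st2.1.getD c 0 + st2.2.getD c 0) else st2.1,
       st2.2.insert c 0)) (st.1, dd)

def pvBodyB (d : PySem.Dict String Int) (day : List String) : PySem.Dict String Int :=
  (PySem.Set.ofList day).foldl (fun d c => d.insert c (d.getD c 0 + 1)) d

-- second inner loop of a day: pays each roster customer its day mark (cap check), resets the marks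
theorem pvPayLoop (k : Int) (ks : List String) (hnd : ks.Nodup) :
    ∀ (d1 d2 : PySem.Dict String Int), (∀ c ∈ ks, c ∈ d1.keys) →
    (∀ x, (ks.foldl (fun st2 c =>
        (if st2.1.getD c 0 < k then st2.1.insert c (st2.1.getD c 0 + st2.2.getD c 0) else st2.1,
         st2.2.insert c 0)) (d1, d2)).1.getD x 0
      = if x ∈ ks ∧ d1.getD x 0 < k then d1.getD x 0 + d2.getD x 0 else d1.getD x 0)
    ∧ (∀ x, (ks.foldl (fun st2 c =>
        (if st2.1.getD c 0 < k then st2.1.insert c (st2.1.getD c 0 + st2.2.getD c 0) else st2.1,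
         st2.2.insert c 0)) (d1, d2)).2.getD x 0
      = if x ∈ ks then 0 else d2.getD x 0)
    ∧ (ks.foldl (fun st2 c =>
        (if st2.1.getD c 0 < k then st2.1.insert c (st2.1.getD c 0 + st2.2.getD c 0) else st2.1,
         st2.2.insert c 0)) (d1, d2)).1.keys = d1.keys := by
  induction ks with
  | nil => intro d1 d2 _; refine ⟨fun x => by simp, fun x => by simp, rfl⟩
  | cons c t ih =>
      intro d1 d2 hks
      have hct : c ∉ t := (List.nodup_cons.mp hnd).1
      have hndt : t.Nodup := (List.nodup_cons.mp hnd).2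
      set d1' := if d1.getD c 0 < k then d1.insert c (d1.getD c 0 + d2.getD c 0) else d1 with hd1'
      have hkeys1' : d1'.keys = d1.keys := by
        rw [hd1']; split
        · exact PySem.Dict.keys_insert_of_contains _ _
            ((PySem.Dict.contains_iff_mem_keys _ _).mpr (hks c List.mem_cons_self))
        · rfl
      have hks' : ∀ c' ∈ t, c' ∈ d1'.keys := by
        intro c' hc'; rw [hkeys1']; exact hks c' (List.mem_cons_of_mem _ hc')
      obtain ⟨H1, H2, H3⟩ := ih hndt d1' (d2.insert c 0) hks'
      rw [List.foldl_cons]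
      refine ⟨fun x => ?_, fun x => ?_, by rw [H3, hkeys1']⟩
      · rw [H1 x]
        by_cases hxc : x = c
        · subst hxc
          simp only [hct, hd1']
          by_cases hlt : d1.getD x 0 < k <;>
            simp [hlt, hct, PySem.Dict.getD_insert_self, List.mem_cons]
        · have e1 : d1'.getD x 0 = d1.getD x 0 := by
            rw [hd1']; split
            · exact PySem.Dict.getD_insert_of_ne _ _ _ hxc
            · rfl
          have e2 : (d2.insert c 0).getD x 0 = d2.getD x 0 :=
            PySem.Dict.getD_insert_of_ne _ _ _ hxc
          rw [e1, e2]; simp [List.mem_cons, hxc]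
      · rw [H2 x]
        by_cases hxc : x = c
        · subst hxc; simp [hct, PySem.Dict.getD_insert_self]
        · rw [PySem.Dict.getD_insert_of_ne _ _ _ hxc]; simp [List.mem_cons, hxc]

theorem pvArith (k v : Int) (hv : 0 ≤ v) :
    (if min v (pvCap k) < k then min v (pvCap k) + 1 else min v (pvCap k)) = min (v + 1) (pvCap k) := by
  unfold pvCap; split_ifs <;> omega

theorem pvCnt_cons (day : List String) (ds : List (List String)) (c : String) :
    pvCnt (day :: ds) c = pvCnt ds c + (if c ∈ day then 1 else 0) := by
  unfold pvCnt; rw [List.countP_cons]; push_cast; split_ifs with h h' h' <;> simp_all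

-- the whole day loop: the coupon dict reads min(count so far, cap)
theorem pvDayLoop (k : Int) (ks : List String) (hnd : ks.Nodup) (ds : List (List String))
    (hsub : ∀ day ∈ ds, ∀ t ∈ day, t ∈ ks) :
    ∀ (d1 d2 : PySem.Dict String Int) (v : String → Int),
    (∀ c, d1.getD c 0 = min (v c) (pvCap k)) → (∀ c, 0 ≤ v c) →
    (∀ c, d2.getD c 0 = 0) → d1.keys = ks →
    (∀ x, (ds.foldl (pvBodyA k ks) (d1, d2)).1.getD x 0 = min (v x + pvCnt ds x) (pvCap k))
    ∧ (ds.foldl (pvBodyA k ks) (d1, d2)).1.keys = ks := by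
  induction ds with
  | nil =>
      intro d1 d2 v hv1 hv2 hz hk
      refine ⟨fun x => ?_, hk⟩
      simp [pvCnt, hv1 x]
  | cons day rest ih =>
      intro d1 d2 v hv1 hv2 hz hk
      have hsubday : ∀ t ∈ day, t ∈ ks := hsub day List.mem_cons_self
      have hsubrest : ∀ d ∈ rest, ∀ t ∈ d, t ∈ ks :=
        fun d hd => hsub d (List.mem_cons_of_mem _ hd)
      -- the day-mark dict
      have hdd : ∀ c, (day.foldl (fun dd t =>
          if dd.getD t 0 == 0 then dd.insert t (dd.getD t 0 + 1) else dd) d2).getD c 0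
          = if c ∈ day then 1 else 0 := by
        intro c
        have := pvDayMark day d2 (S := fun _ => False) (by simpa using hz) c
        simpa using this
      set dd := day.foldl (fun dd t =>
          if dd.getD t 0 == 0 then dd.insert t (dd.getD t 0 + 1) else dd) d2 with hdddef
      have hks1 : ∀ c ∈ ks, c ∈ d1.keys := fun c hc => hk ▸ hc
      obtain ⟨H1, H2, H3⟩ := pvPayLoop k ks hnd d1 dd hks1
      have hstep : List.foldl (pvBodyA k ks) (d1, d2) (day :: rest)
          = List.foldl (pvBodyA k ks) (ks.foldl (fun st2 c =>
              (if st2.1.getD c 0 < k then st2.1.insert c (st2.1.getD c 0 + st2.2.getD c 0) else st2.1,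
               st2.2.insert c 0)) (d1, dd)) rest := by
        rw [List.foldl_cons]; rfl
      set st' := ks.foldl (fun st2 c =>
          (if st2.1.getD c 0 < k then st2.1.insert c (st2.1.getD c 0 + st2.2.getD c 0) else st2.1,
           st2.2.insert c 0)) (d1, dd) with hst'
      have hpair : st' = (st'.1, st'.2) := rfl
      have hv1' : ∀ c, st'.1.getD c 0
          = min (v c + (if c ∈ day then 1 else 0)) (pvCap k) := by
        intro c
        rw [H1 c, hdd c]
        by_cases hcd : c ∈ day
        · have hcks : c ∈ ks := hsubday c hcd
          simp only [hcd, if_true, hcks, true_and]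
          rw [hv1 c]
          have := pvArith k (v c) (hv2 c)
          by_cases hlt : min (v c) (pvCap k) < k <;> simp [hlt] at this ⊢ <;> omega
        · simp only [hcd, if_false]
          rw [hv1 c]
          split <;> simp
      have hz' : ∀ c, st'.2.getD c 0 = 0 := by
        intro c
        rw [H2 c]
        by_cases hcks : c ∈ ks
        · simp [hcks]
        · have hcd : c ∉ day := fun hcd => hcks (hsubday c hcd)
          simp [hcks, hdd c, hcd]
      have hk' : st'.1.keys = ks := by rw [H3, hk]
      have hv2' : ∀ c, 0 ≤ v c + (if c ∈ day then 1 else 0) := by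
        intro c; have := hv2 c; split <;> omega
      obtain ⟨G1, G2⟩ := ih hsubrest st'.1 st'.2
        (fun c => v c + (if c ∈ day then 1 else 0)) hv1' hv2' hz' hk'
      rw [← hpair] at G1 G2
      rw [hstep]
      refine ⟨fun x => ?_, G2⟩
      rw [G1 x, pvCnt_cons]
      congr 1
      ring

-- B's freq dict: keys are the roster, values the day counts
theorem pvUpdOfList (s : PySem.Set String) (xs : List String) :
    s.update (PySem.Set.ofList xs) = s.update xs := by
  rw [PySem.Set.update_eq_append_filter, PySem.Set.update_eq_append_filter,
    PySem.Set.ofList_ofList]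

theorem pvCntDay (day : List String) (c : String) :
    ((PySem.Set.ofList day).count c : Int) = if c ∈ day then 1 else 0 := by
  by_cases h : c ∈ day
  · rw [List.count_eq_one_of_mem (PySem.Set.nodup_ofList day) ((PySem.Set.mem_ofList _ _).mpr h)]
    simp [h]
  · rw [List.count_eq_zero_of_not_mem (fun hc => h ((PySem.Set.mem_ofList _ _).mp hc))]
    simp [h]

theorem pvFreqGetD (ds : List (List String)) (d : PySem.Dict String Int) (c : String) :
    (ds.foldl pvBodyB d).getD c 0 = d.getD c 0 + pvCnt ds c := by
  induction ds generalizing d with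
  | nil => simp [pvCnt]
  | cons day rest ih =>
      rw [List.foldl_cons, ih, pvCnt_cons]
      have : (pvBodyB d day).getD c 0 = d.getD c 0 + ((PySem.Set.ofList day).count c : Int) :=
        PySem.Dict.getD_foldl_insert_add_one _ _ _
      rw [this, pvCntDay]; ring

theorem pvFreqKeys (ds : List (List String)) (d : PySem.Dict String Int) :
    (ds.foldl pvBodyB d).keys = ds.foldl (fun acc day => PySem.Set.update acc day) d.keys := by
  induction ds generalizing d with
  | nil => rfl
  | cons day rest ih =>
      rw [List.foldl_cons, ih, List.foldl_cons]
      have : (pvBodyB d day).keys = PySem.Set.update d.keys day := by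
        rw [pvBodyB, PySem.Dict.keys_foldl_insert, pvUpdOfList]
      rw [this]

-- ===== VERDICT (by name: the statement is the Claim_ definition above) =====
theorem solution_alt_eval (id_list : List String) (k : Int) :
    solution_alt id_list k
      = ((pvIds (id_list.map PySem.Str.split₀)).map
          (fun c => min (pvCnt (id_list.map PySem.Str.split₀) c) (pvCap k))).sum := by
  simp only [solution_alt]
  set days := id_list.map PySem.Str.split₀ with hdays
  have hfreq : id_list.foldl (fun d s =>
      (PySem.Set.ofList (PySem.Str.split₀ s)).foldl (fun d c => d.insert c (d.getD c 0 + 1)) d)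
      PySem.Dict.empty = days.foldl pvBodyB PySem.Dict.empty := by
    rw [hdays, List.foldl_map]; rfl
  rw [hfreq]
  have hkeys : (days.foldl pvBodyB PySem.Dict.empty).keys = pvIds days := by
    rw [pvFreqKeys]; rfl
  have hvals : (days.foldl pvBodyB PySem.Dict.empty).values
      = (pvIds days).map (fun c => (days.foldl pvBodyB PySem.Dict.empty).getD c 0) := by
    rw [← hkeys]
    exact PySem.Dict.values_eq_map_keys _ (hkeys ▸ pvIds_nodup days) 0
  rw [hvals, List.map_map]
  congr 1
  apply List.map_congr_left
  intro c _
  simp [Function.comp_apply, pvFreqGetD, PySem.Dict.getD_empty, pvCap]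

theorem solution_eval (id_list : List String) (k : Int) :
    solution id_list k
      = ((pvIds (id_list.map PySem.Str.split₀)).map
          (fun c => min (pvCnt (id_list.map PySem.Str.split₀) c) (pvCap k))).sum := by
  simp only [solution]
  set days := id_list.map PySem.Str.split₀ with hdays
  set ids := pvIds days with hids
  have hfun : (fun (acc : List String) (t : String) => if t ∈ acc then acc else acc ++ [t])
      = fun acc t => PySem.Set.add acc t := by
    funext acc t; rw [PySem.Set.add_eq_ite]
  have h0 : id_list.foldl (fun st s =>
      (st.1 ++ [PySem.Str.split₀ s],
       (PySem.Str.split₀ s).foldl (fun acc t => if t ∈ acc then acc else acc ++ [t]) st.2))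
      (([] : List (List String)), ([] : List String)) = (days, ids) := by
    rw [PySem.List.foldl_prod_mk (f := fun acc s => acc ++ [PySem.Str.split₀ s])
      (g := fun acc s => (PySem.Str.split₀ s).foldl
        (fun acc t => if t ∈ acc then acc else acc ++ [t]) acc)]
    refine Prod.ext ?_ ?_
    · simpa using PySem.List.foldl_append_singleton_eq_map PySem.Str.split₀ id_list []
    · simp only [hfun, hids]
      unfold pvIds
      rw [hdays, List.foldl_map]
      rfl
  rw [h0]
  set counter : List Int := (PySem.List.pyRange 0 (ids.length : Int)).map (fun _ => 0) with hcounter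
  set ps := ids.zip counter with hps
  have hlen : ids.length ≤ counter.length := by
    rw [hcounter, PySem.List.pyRange_zero_natCast ids.length]
    simp
  have hz : ∀ p ∈ ps, p.2 = (0 : Int) := by
    intro p hp
    have : p.2 ∈ counter := (List.of_mem_zip hp).2
    rw [hcounter] at this
    obtain ⟨x, -, hx⟩ := List.mem_map.mp this
    exact hx.symm
  have hd0 : ∀ c, (PySem.Dict.ofList ps).getD c 0 = 0 :=
    pvZeroDict ps PySem.Dict.empty (fun c => PySem.Dict.getD_empty c 0) hz
  have hkeys0 : (PySem.Dict.ofList ps).keys = ids := by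
    have h := PySem.Dict.keys_foldl_insert_key (ν := Int) ps Prod.fst (fun _ p => p.2)
      PySem.Dict.empty
    show (List.foldl (fun acc p => acc.insert p.1 p.2) PySem.Dict.empty ps).keys = ids
    rw [h, PySem.Dict.keys_empty, List.map_fst_zip hlen, PySem.Set.update_nil_left,
      PySem.Set.ofList_eq_self_of_nodup ids (hids ▸ pvIds_nodup days)]
  have hsub : ∀ day ∈ days, ∀ t ∈ day, t ∈ ids := by
    intro day hd t ht
    exact hids ▸ (pvIds_mem days t).mpr ⟨day, hd, ht⟩
  have hv1 : ∀ c, (PySem.Dict.ofList ps).getD c 0 = min ((fun _ => (0:Int)) c) (pvCap k) := by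
    intro c
    rw [hd0 c]
    exact (min_eq_left (pvCap_nonneg k)).symm
  obtain ⟨F1, F2⟩ := pvDayLoop k ids (hids ▸ pvIds_nodup days) days hsub
    (PySem.Dict.ofList ps) (PySem.Dict.ofList ps) (fun _ => 0) hv1
    (fun c => le_refl 0) hd0 hkeys0
  have hbody : (fun (st : PySem.Dict String Int × PySem.Dict String Int) day =>
      let dd := day.foldl (fun dd t =>
          if dd.getD t 0 == 0 then dd.insert t (dd.getD t 0 + 1) else dd) st.2
      ids.foldl (fun st2 c =>
          (if st2.1.getD c 0 < k then st2.1.insert c (st2.1.getD c 0 + st2.2.getD c 0) else st2.1,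
           st2.2.insert c 0)) (st.1, dd)) = pvBodyA k ids := rfl
  rw [hbody]
  have hvals : (days.foldl (pvBodyA k ids) (PySem.Dict.ofList ps, PySem.Dict.ofList ps)).1.values
      = ids.map (fun c =>
          (days.foldl (pvBodyA k ids) (PySem.Dict.ofList ps, PySem.Dict.ofList ps)).1.getD c 0) := by
    have hnodup : (days.foldl (pvBodyA k ids)
        (PySem.Dict.ofList ps, PySem.Dict.ofList ps)).1.keys.Nodup := by
      rw [F2]; exact hids ▸ pvIds_nodup days
    have := PySem.Dict.values_eq_map_keys
      (days.foldl (pvBodyA k ids) (PySem.Dict.ofList ps, PySem.Dict.ofList ps)).1 hnodup 0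
    rw [this, F2]
  rw [hvals]
  congr 1
  apply List.map_congr_left
  intro c _
  rw [F1 c]
  simp

theorem solution_spec : Claim_equal_solution := by
  intro id_list k _
  unfold Spec_solution
  rw [solution_eval, solution_alt_eval]
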